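-- pv_equiv track=rewrite | github.com/windellevega/stackleague | eye_drawer.py | draw_eye
-- ===== SOURCE A (Python) =====
-- def draw_eye(value):
--     # code here
--     midPoints = value - 2
--     sidePoints = value - 2 # -2 every line
--     sideMidPoints = 0 # increased by 2 every line
--     eye = ''
--
--     eye += '.' * value + '#' * value + '.' * value + '\n'
--     for ctr in range(value - 1):
--         eye += '.' * sidePoints + '##' + '.' * sideMidPoints + '#' + '.' * midPoints + '#' + '.' * sideMidPoints + '##' + '.' * sidePoints + '\n'
--
--         if ctr < (value - 3) / 2:
--             sidePoints -= 2
--             sideMidPoints += 2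
--         elif ctr > (value - 3) / 2:
--             sidePoints += 2
--             sideMidPoints -= 2
--     eye += '.' * value + '#' * value + '.' * value
--
--     return eye
-- ===== SOURCE B (Python) =====
-- def draw_eye(value):
--     # per-line closed form: d = net decrements applied before line ctr
--     border = '.' * value + '#' * value + '.' * value
--     lo = max(0, (value - 2) // 2)
--     hi = max(0, (value - 1) // 2)
--     lines = [border]
--     for ctr in range(value - 1):
--         d = min(ctr, lo) - max(0, ctr - hi)
--         side = value - 2 - 2 * d
--         lines.append('.' * side + '##' + '.' * (2 * d) + '#' + '.' * (value - 2)
--                      + '#' + '.' * (2 * d) + '##' + '.' * side)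
--     lines.append(border)
--     return '\n'.join(lines)
-- ===== Notes on version B (the rewrite author's own statement) =====
-- stated objective: alternative
-- what changed: Replaced the stateful loop with three mutable counters and a float-midpoint branch by a per-line closed form (distance-from-center net decrement count via integer floordivs) that computes each interior line directly from its index, collecting lines in a list joined by '\n'.
import Mathlib
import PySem

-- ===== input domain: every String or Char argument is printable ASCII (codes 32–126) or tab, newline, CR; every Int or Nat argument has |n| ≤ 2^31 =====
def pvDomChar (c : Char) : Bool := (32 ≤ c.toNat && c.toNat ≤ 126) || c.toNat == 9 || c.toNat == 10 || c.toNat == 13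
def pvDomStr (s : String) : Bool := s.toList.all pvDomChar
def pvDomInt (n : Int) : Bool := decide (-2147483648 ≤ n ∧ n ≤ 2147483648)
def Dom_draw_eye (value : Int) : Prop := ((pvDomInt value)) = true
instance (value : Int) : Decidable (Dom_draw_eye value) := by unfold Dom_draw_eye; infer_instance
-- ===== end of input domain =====

-- B replaces A's three running counters and midpoint-flip branch by a closed form for each
-- interior line computed directly from its index (alternative decomposition; same cost).

-- '.' * n  (Python: negative n gives the empty string); built on List Char, String.mk at the end
def pvRep (n : Int) (c : Char) : List Char := List.replicate n.toNat c

-- ===== PORT A =====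
-- loop body of A; midPoints = value - 2 is constant, inlined here.
-- A's 'ctr < (value - 3) / 2' is a float comparison; it is exact for |value| ≤ 2^31 and is
-- ported as the equivalent integer comparison 2*ctr < value - 3 (likewise '>').
def drawEyeStep (value : Int) (st : Int × Int × List Char) (ctr : Int) : Int × Int × List Char :=
  let eye := st.2.2 ++ pvRep st.1 '.' ++ ['#', '#'] ++ pvRep st.2.1 '.' ++ ['#'] ++
             pvRep (value - 2) '.' ++ ['#'] ++ pvRep st.2.1 '.' ++ ['#', '#'] ++
             pvRep st.1 '.' ++ ['\n']
  if 2 * ctr < value - 3 then (st.1 - 2, st.2.1 + 2, eye)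
  else if 2 * ctr > value - 3 then (st.1 + 2, st.2.1 - 2, eye)
  else (st.1, st.2.1, eye)

def draw_eye (value : Int) : String :=
  -- state (sidePoints, sideMidPoints, eye), eye starting as the border line plus '\n'
  let eye0 : List Char := pvRep value '.' ++ pvRep value '#' ++ pvRep value '.' ++ ['\n']
  let res := (PySem.List.pyRange 0 (value - 1) 1).foldl (drawEyeStep value) (value - 2, (0 : Int), eye0)
  String.mk (res.2.2 ++ pvRep value '.' ++ pvRep value '#' ++ pvRep value '.')

-- ===== PORT B =====
-- interior line at index ctr, from the closed-form net decrement count d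
def pvLine (value lo hi ctr : Int) : List Char :=
  let d := min ctr lo - max 0 (ctr - hi)
  let side := value - 2 - 2 * d
  pvRep side '.' ++ ['#', '#'] ++ pvRep (2 * d) '.' ++ ['#'] ++ pvRep (value - 2) '.' ++
    ['#'] ++ pvRep (2 * d) '.' ++ ['#', '#'] ++ pvRep side '.'

def draw_eye_alt (value : Int) : String :=
  let border : List Char := pvRep value '.' ++ pvRep value '#' ++ pvRep value '.'
  let lo := max 0 (PySem.Int.floordiv (value - 2) 2)
  let hi := max 0 (PySem.Int.floordiv (value - 1) 2)
  let lines := [border] ++ (PySem.List.pyRange 0 (value - 1) 1).map (pvLine value lo hi) ++ [border]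
  String.mk (PySem.Chars.join ['\n'] lines)

-- ===== PRECONDITION & SPEC =====
def Spec_draw_eye (value : Int) (out : String) : Prop := out = draw_eye_alt value
instance (value : Int) (out : String) : Decidable (Spec_draw_eye value out) := by unfold Spec_draw_eye; infer_instance

-- ===== CLAIM (what is proved, stated in full; the proofs are below) =====
def Claim_equal_draw_eye : Prop := ∀ (value : Int), Dom_draw_eye value → Spec_draw_eye value (draw_eye value)

-- ===== LEMMAS AND PROOFS =====

-- the closed-form net decrement count after n iterations
def pvD (lo hi n : Int) : Int := min n lo - max 0 (n - hi)

lemma pv_join_cons (x : List Char) (l : List (List Char)) (h : l ≠ []) :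
    PySem.Chars.join ['\n'] (x :: l) = x ++ ['\n'] ++ PySem.Chars.join ['\n'] l := by
  cases l with
  | nil => exact absurd rfl h
  | cons y ys => exact PySem.Chars.join_cons_cons _ _ _ _

-- join with '\n' of (L ++ [b]) = the elements of L each followed by '\n', then b
lemma pv_join_aux (L : List (List Char)) (b : List Char) :
    PySem.Chars.join ['\n'] (L ++ [b]) = L.flatMap (· ++ ['\n']) ++ b := by
  induction L with
  | nil => simp [PySem.Chars.join_singleton]
  | cons x xs ih =>
      rw [List.cons_append, pv_join_cons x (xs ++ [b]) (by simp), ih]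
      simp

-- pyRange up to an Int bound equals pyRange up to its toNat
lemma pv_range_toNat (b : Int) :
    PySem.List.pyRange 0 b 1 = PySem.List.pyRange 0 ((b.toNat : Int)) 1 := by
  rw [PySem.List.pyRange_one, PySem.List.pyRange_one]
  have h : (b - 0).toNat = (((b.toNat : Int)) - 0).toNat := by omega
  rw [h]

-- loop invariant: after n iterations the counters equal the closed form and the
-- accumulated string is the flatMap of the closed-form lines
lemma pv_fold_inv (value lo hi : Int)
    (hlo : lo = max 0 (PySem.Int.floordiv (value - 2) 2))
    (hhi : hi = max 0 (PySem.Int.floordiv (value - 1) 2))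
    (e0 : List Char) (n : Nat) :
    (PySem.List.pyRange 0 (n : Int) 1).foldl (drawEyeStep value) (value - 2, (0 : Int), e0)
    = (value - 2 - 2 * pvD lo hi n, 2 * pvD lo hi n,
       e0 ++ (PySem.List.pyRange 0 (n : Int) 1).flatMap (fun c => pvLine value lo hi c ++ ['\n'])) := by
  have h2 : PySem.Int.floordiv (value - 2) 2 = (value - 2) / 2 := by
    simp [PySem.Int.floordiv, Int.fdiv_eq_ediv]
  have h1 : PySem.Int.floordiv (value - 1) 2 = (value - 1) / 2 := by
    simp [PySem.Int.floordiv, Int.fdiv_eq_ediv]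
  induction n with
  | zero =>
      have h0 : pvD lo hi 0 = 0 := by subst hlo hhi; rw [h1, h2]; unfold pvD; omega
      simp [PySem.List.pyRange_one_eq_nil le_rfl, h0]
  | succ n ih =>
      have hsplit : PySem.List.pyRange 0 ((n + 1 : Nat) : Int) 1
          = PySem.List.pyRange 0 (n : Int) 1 ++ [(n : Int)] := by
        push_cast
        exact PySem.List.pyRange_one_succ_right (by positivity)
      rw [hsplit, List.foldl_append, ih, List.flatMap_append]
      have hd : pvLine value lo hi (n : Int) =
          pvRep (value - 2 - 2 * pvD lo hi n) '.' ++ ['#', '#'] ++ pvRep (2 * pvD lo hi n) '.' ++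
          ['#'] ++ pvRep (value - 2) '.' ++ ['#'] ++ pvRep (2 * pvD lo hi n) '.' ++ ['#', '#'] ++
          pvRep (value - 2 - 2 * pvD lo hi n) '.' := by
        simp [pvLine, pvD]
      have hDsucc :
          (if 2 * (n : Int) < value - 3 then pvD lo hi n + 1
           else if 2 * (n : Int) > value - 3 then pvD lo hi n - 1
           else pvD lo hi n) = pvD lo hi ((n : Int) + 1) := by
        subst hlo hhi
        rw [h1, h2]
        unfold pvD
        split_ifs <;> omega
      simp only [List.foldl_cons, List.foldl_nil, drawEyeStep]
      push_cast
      rw [← hDsucc]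
      split_ifs with hlt hgt <;>
        exact Prod.ext (by first | rfl | ring)
          (Prod.ext (by first | rfl | ring) (by simp [hd, List.append_assoc]))

-- ===== VERDICT (by name: the statement is the Claim_ definition above) =====
theorem draw_eye_spec : Claim_equal_draw_eye := by
  intro value _
  unfold Spec_draw_eye draw_eye draw_eye_alt
  dsimp only
  rw [pv_range_toNat (value - 1),
    pv_fold_inv value (max 0 (PySem.Int.floordiv (value - 2) 2))
      (max 0 (PySem.Int.floordiv (value - 1) 2)) rfl rfl _ ((value - 1).toNat)]
  rw [List.singleton_append, pv_join_aux]
  simp [List.flatMap_map, List.append_assoc]
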